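-- pv_equiv track=rewrite | github.com/Hocheol18/Coding_Study | Programmers_Coding_Test/3차/호철/3.py | solution
-- ===== SOURCE A (Python) =====
-- def solution(distance, scope, times):
--     res = [distance]
--
--     for i in range(len(scope)):
--         a = times[i][0]
--         min_s = min(scope[i])
--         max_s = max(scope[i])
--
--         if min_s <= a <= max_s:
--             res.append(min_s)
--
--         elif a < min_s:
--             a += times[i][1]
--             b = min_s // a
--             for j in range(1, times[i][0]+1):
--                 c = b * a + j
--                 if min_s <= c <= max_s:
--                     res.append(c)
--                     break
--             b = max_s // a
--             for j in range(1, times[i][0]+1):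
--                 c = b * a + j
--                 if min_s <= c <= max_s:
--                     res.append(c)
--                     break
--
--         elif a > max_s:
--             res.append(min_s)
--
--     return min(res)
-- ===== SOURCE B (Python) =====
-- def solution(distance, scope, times):
--     best = distance
--     for s, t in zip(scope, times):
--         lo, hi = min(s), max(s)
--         a = t[0]
--         if a < lo:
--             cyc = a + t[1]
--             for b in (lo // cyc, hi // cyc):
--                 j0 = max(1, lo - b * cyc)
--                 c = b * cyc + j0
--                 if j0 <= a and c <= hi:
--                     best = min(best, c)
--         else:
--             best = min(best, lo)
--     return best
-- ===== Notes on version B (the rewrite author's own statement) =====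
-- stated objective: alternative
-- what changed: B computes the first in-range patrol moment for each candidate quotient by a closed-form formula (j0 = max(1, min_s - b*cycle)) instead of A's linear scan over j = 1..times[i][0], and folds a running minimum over zip(scope, times) instead of appending candidates to a list and taking min at the end; this removes the dependence on the magnitude of times[i][0], though on the measured inputs (small times) the cost is the same.
import Mathlib
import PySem

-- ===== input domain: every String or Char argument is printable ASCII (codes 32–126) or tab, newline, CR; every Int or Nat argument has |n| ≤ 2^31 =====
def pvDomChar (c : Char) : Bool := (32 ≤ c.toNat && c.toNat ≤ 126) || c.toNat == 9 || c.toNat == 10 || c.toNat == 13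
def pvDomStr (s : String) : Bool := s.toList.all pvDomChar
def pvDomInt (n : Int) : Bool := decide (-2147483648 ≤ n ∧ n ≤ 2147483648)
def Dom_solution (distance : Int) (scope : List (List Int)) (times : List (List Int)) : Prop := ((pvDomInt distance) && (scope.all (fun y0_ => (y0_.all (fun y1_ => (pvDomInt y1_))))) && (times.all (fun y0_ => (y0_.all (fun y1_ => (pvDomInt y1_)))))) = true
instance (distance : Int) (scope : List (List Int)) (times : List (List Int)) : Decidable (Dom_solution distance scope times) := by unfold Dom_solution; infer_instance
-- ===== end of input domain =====

-- B replaces A's linear scan for the first in-range patrol moment (up to times[i][0] iterations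
-- per candidate) by a closed-form first-candidate formula, and folds a running minimum over
-- zip(scope, times) instead of building a list and taking min at the end. Objective: alternative.

-- ===== PORT A =====
-- inner 'for j in range(1, times[i][0]+1): … break' loop of A, as a first-hit fold
def scanStepA (b cyc lo hi : Int) (acc : Option Int) (j : Int) : Option Int :=
  match acc with
  | some c => some c
  | none => if lo ≤ b * cyc + j ∧ b * cyc + j ≤ hi then some (b * cyc + j) else none

def scanA (b cyc lo hi atop : Int) : Option Int :=
  (PySem.List.pyRange 1 (atop + 1)).foldl (scanStepA b cyc lo hi) none

-- body of A's outer loop: the values appended to res for index i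
def contribA (s t : List Int) : List Int :=
  let a := PySem.List.pyGetD t 0 0
  let lo := (PySem.List.min? s (fun x => x)).getD 0
  let hi := (PySem.List.max? s (fun x => x)).getD 0
  if lo ≤ a ∧ a ≤ hi then [lo]
  else if a < lo then
    let cyc := a + PySem.List.pyGetD t 1 0
    (scanA (PySem.Int.floordiv lo cyc) cyc lo hi a).toList ++
      (scanA (PySem.Int.floordiv hi cyc) cyc lo hi a).toList
  else if hi < a then [lo]
  else []

def solution (distance : Int) (scope : List (List Int)) (times : List (List Int)) : Int :=
  let res := (PySem.List.pyRange 0 (PySem.List.len scope)).foldl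
    (fun res i => res ++ contribA (PySem.List.pyGetD scope i []) (PySem.List.pyGetD times i []))
    [distance]
  ((PySem.List.min? res (fun x => x)).getD 0)

-- ===== PORT B =====
def solution_alt (distance : Int) (scope : List (List Int)) (times : List (List Int)) : Int :=
  (scope.zip times).foldl (fun best p =>
    let lo := (PySem.List.min? p.1 (fun x => x)).getD 0
    let hi := (PySem.List.max? p.1 (fun x => x)).getD 0
    let a := PySem.List.pyGetD p.2 0 0
    if a < lo then
      let cyc := a + PySem.List.pyGetD p.2 1 0
      [PySem.Int.floordiv lo cyc, PySem.Int.floordiv hi cyc].foldl (fun best b =>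
        let j0 := max 1 (lo - b * cyc)
        let c := b * cyc + j0
        if j0 ≤ a ∧ c ≤ hi then min best c else best) best
    else min best lo) distance

-- ===== PRECONDITION & SPEC =====
-- Pre_ excludes exactly the inputs where the Python A raises: an index i < len(scope) with
-- i ≥ len(times) (IndexError), an empty scope[i] (min of empty), an empty times[i]
-- (times[i][0]), and — in the a < min(scope[i]) branch — a missing times[i][1] or a zero
-- patrol cycle times[i][0] + times[i][1] (ZeroDivisionError).
def Pre_solution (distance : Int) (scope : List (List Int)) (times : List (List Int)) : Prop :=
  scope.length ≤ times.length ∧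
  ∀ i < scope.length,
    scope.getD i [] ≠ [] ∧ times.getD i [] ≠ [] ∧
    ((times.getD i []).getD 0 0 < (PySem.List.min? (scope.getD i []) (fun x => x)).getD 0 →
      2 ≤ (times.getD i []).length ∧
      (times.getD i []).getD 0 0 + (times.getD i []).getD 1 0 ≠ 0)
instance (distance : Int) (scope : List (List Int)) (times : List (List Int)) : Decidable (Pre_solution distance scope times) := by unfold Pre_solution; infer_instance

def pvWitness_solution : Int × List (List Int) × List (List Int) := (0, [[1]], [[2]])

def Spec_solution (distance : Int) (scope : List (List Int)) (times : List (List Int)) (out : Int) : Prop := out = solution_alt distance scope times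
instance (distance : Int) (scope : List (List Int)) (times : List (List Int)) (out : Int) : Decidable (Spec_solution distance scope times out) := by unfold Spec_solution; infer_instance

-- ===== CLAIM (what is proved, stated in full; the proofs are below) =====
def Claim_equal_solution : Prop := ∀ (distance : Int) (scope : List (List Int)) (times : List (List Int)), Dom_solution distance scope times → Pre_solution distance scope times → Spec_solution distance scope times (solution distance scope times)

-- ===== LEMMAS AND PROOFS =====

-- once the scan has found a hit, the rest of the range leaves it unchanged
lemma scanStepA_some (b cyc lo hi c : Int) (l : List Int) :
    l.foldl (scanStepA b cyc lo hi) (some c) = some c := by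
  induction l with
  | nil => rfl
  | cons x xs ih => simpa [scanStepA] using ih

-- the first-hit scan over an increasing range equals the closed-form candidate
lemma scan_loop (b cyc lo hi : Int) (n : Nat) : ∀ s e : Int, (e - s).toNat = n →
    (PySem.List.pyRange s e).foldl (scanStepA b cyc lo hi) none =
      (if max s (lo - b * cyc) < e ∧ b * cyc + max s (lo - b * cyc) ≤ hi
        then some (b * cyc + max s (lo - b * cyc)) else none) := by
  induction n with
  | zero =>
    intro s e h
    have he : e ≤ s := by omega
    rw [PySem.List.pyRange_one_eq_nil he]
    simp only [List.foldl_nil]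
    have : ¬ (max s (lo - b * cyc) < e ∧ b * cyc + max s (lo - b * cyc) ≤ hi) := by
      intro ⟨h1, _⟩; omega
    exact (if_neg this).symm
  | succ n ih =>
    intro s e h
    have hlt : s < e := by omega
    rw [PySem.List.pyRange_one_cons hlt]
    simp only [List.foldl_cons]
    by_cases h1 : lo ≤ b * cyc + s ∧ b * cyc + s ≤ hi
    · rw [show scanStepA b cyc lo hi none s = some (b * cyc + s) by simp [scanStepA, h1]]
      rw [scanStepA_some]
      have hmax : max s (lo - b * cyc) = s := by omega
      rw [hmax]
      simp only [hlt, h1.2, and_self, if_true]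
    · rw [show scanStepA b cyc lo hi none s = none by
        simp only [scanStepA]; rw [if_neg h1]]
      rw [ih (s + 1) e (by omega)]
      split_ifs with hA hB
      · have hm : max (s + 1) (lo - b * cyc) = max s (lo - b * cyc) := by omega
        rw [hm]
      · exfalso; omega
      · exfalso; omega
      · rfl

-- B's body for one (scope[i], times[i]) pair
def bstep (best : Int) (p : List Int × List Int) : Int :=
  let lo := (PySem.List.min? p.1 (fun x => x)).getD 0
  let hi := (PySem.List.max? p.1 (fun x => x)).getD 0
  let a := PySem.List.pyGetD p.2 0 0
  if a < lo then
    let cyc := a + PySem.List.pyGetD p.2 1 0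
    [PySem.Int.floordiv lo cyc, PySem.Int.floordiv hi cyc].foldl (fun best b =>
      let j0 := max 1 (lo - b * cyc)
      let c := b * cyc + j0
      if j0 ≤ a ∧ c ≤ hi then min best c else best) best
  else min best lo

-- folding min over A's contribution for one index equals B's one-pair update
lemma contrib_min (s t : List Int) (acc : Int) :
    (contribA s t).foldl min acc = bstep acc (s, t) := by
  unfold contribA bstep
  set a := PySem.List.pyGetD t 0 0 with ha
  set lo := (PySem.List.min? s (fun x => x)).getD 0 with hlo
  set hi := (PySem.List.max? s (fun x => x)).getD 0 with hhi
  by_cases hc1 : lo ≤ a ∧ a ≤ hi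
  · have : ¬ a < lo := by omega
    simp [hc1, this]
  · simp only [hc1, if_false]
    by_cases hc2 : a < lo
    · simp only [hc2, if_true]
      set cyc := a + PySem.List.pyGetD t 1 0 with hcyc
      set b1 := PySem.Int.floordiv lo cyc with hb1
      set b2 := PySem.Int.floordiv hi cyc with hb2
      have e1 := scan_loop b1 cyc lo hi (a + 1 - 1).toNat 1 (a + 1) (by omega)
      have e2 := scan_loop b2 cyc lo hi (a + 1 - 1).toNat 1 (a + 1) (by omega)
      have hiff1 : (max 1 (lo - b1 * cyc) < a + 1 ∧ b1 * cyc + max 1 (lo - b1 * cyc) ≤ hi)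
          ↔ (max 1 (lo - b1 * cyc) ≤ a ∧ b1 * cyc + max 1 (lo - b1 * cyc) ≤ hi) := by omega
      have hiff2 : (max 1 (lo - b2 * cyc) < a + 1 ∧ b2 * cyc + max 1 (lo - b2 * cyc) ≤ hi)
          ↔ (max 1 (lo - b2 * cyc) ≤ a ∧ b2 * cyc + max 1 (lo - b2 * cyc) ≤ hi) := by omega
      rw [if_congr hiff1 rfl rfl] at e1
      rw [if_congr hiff2 rfl rfl] at e2
      unfold scanA
      rw [e1, e2]
      simp only [List.foldl_cons, List.foldl_nil]
      split_ifs with h1 h2 h2 <;> simp [Option.toList, min_assoc]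
    · have hc3 : hi < a := by omega
      simp [hc2, hc3]

-- A's indexed outer loop (fold of per-index min-folds) equals B's fold over zip(scope, times)
lemma outer_loop (scope times : List (List Int)) (acc : Int)
    (h : scope.length ≤ times.length) :
    (List.range scope.length).foldl
      (fun acc k => (contribA (scope.getD k []) (times.getD k [])).foldl min acc) acc =
    (scope.zip times).foldl bstep acc := by
  induction scope generalizing times acc with
  | nil => simp
  | cons s ss ih =>
    cases times with
    | nil => simp at h
    | cons t ts =>
      simp only [List.length_cons, List.range_succ_eq_map, List.foldl_cons, List.foldl_map,
        List.getD_cons_zero, List.getD_cons_succ, List.zip_cons_cons, Nat.succ_eq_add_one]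
      rw [ih ts _ (by simpa using h), contrib_min]

-- ===== VERDICT (by name: the statement is the Claim_ definition above) =====
theorem solution_spec : Claim_equal_solution := by
  intro distance scope times _hdom hpre
  unfold Spec_solution solution solution_alt
  rw [show ([distance] : List Int) = [] ++ [distance] from rfl]
  rw [PySem.List.foldl_append_eq_flatMap
    (fun i => contribA (PySem.List.pyGetD scope i []) (PySem.List.pyGetD times i []))]
  simp only [List.nil_append, List.singleton_append]
  rw [PySem.List.min?_id_cons]
  simp only [Option.getD_some]
  rw [List.foldl_flatMap]
  have hlen : (PySem.List.len scope) = (scope.length : Int) := by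
    simp [PySem.List.len]
  rw [hlen, PySem.List.pyRange_one 0 (scope.length : Int), List.foldl_map]
  have hto : ((scope.length : Int) - 0).toNat = scope.length := by omega
  rw [hto]
  have hcast : ∀ (k : Nat) (acc : Int),
      (contribA (PySem.List.pyGetD scope ((0 : Int) + (k : Int)) [])
        (PySem.List.pyGetD times ((0 : Int) + (k : Int)) [])).foldl min acc =
      (contribA (scope.getD k []) (times.getD k [])).foldl min acc := by
    intro k acc
    rw [show (0 : Int) + (k : Int) = (k : Int) by omega,
      PySem.List.pyGetD_natCast, PySem.List.pyGetD_natCast]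
  simp only [hcast]
  rw [outer_loop scope times distance hpre.1]
  rfl
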